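-- pv_equiv track=rewrite | github.com/GozerAI/arclane | src/arclane/services/roadmap_service.py | get_phase_for_day
-- ===== SOURCE A (Python) =====
-- PHASES = {
--     1: {"name": "Foundation", "days": (1, 15), "description": "Clear offer, validated positioning, live surface, first lead capture"},
--     2: {"name": "Validation", "days": (16, 30), "description": "First customer signal, validated demand, distribution running"},
--     3: {"name": "Growth", "days": (31, 45), "description": "Revenue signals, repeatable acquisition, scaling content"},
--     4: {"name": "Scale-Ready", "days": (46, 60), "description": "Repeatable systems, investor readiness, graduation"},
-- }
--
-- def get_phase_for_day(day: int) -> int: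
--     """Return the phase number (1-4) for a given roadmap day, or 5 for post-graduation."""
--     for phase_num, info in PHASES.items():
--         start, end = info["days"]
--         if start <= day <= end:
--             return phase_num
--     if day > 60:
--         return 5  # Post-graduation / forever partner
--     return 0
-- ===== SOURCE B (Python) =====
-- PHASES = {
--     1: {"name": "Foundation", "days": (1, 15), "description": "Clear offer, validated positioning, live surface, first lead capture"},
--     2: {"name": "Validation", "days": (16, 30), "description": "First customer signal, validated demand, distribution running"},
--     3: {"name": "Growth", "days": (31, 45), "description": "Revenue signals, repeatable acquisition, scaling content"},
--     4: {"name": "Scale-Ready", "days": (46, 60), "description": "Repeatable systems, investor readiness, graduation"},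
-- }
--
-- def get_phase_for_day(day: int) -> int:
--     """Return the phase number (1-4) for a given roadmap day, or 5 for post-graduation."""
--     if day < 1:
--         return 0
--     if day > 60:
--         return 5
--     return (day - 1) // 15 + 1
-- ===== Notes on version B (the rewrite author's own statement) =====
-- stated objective: simpler
-- what changed: Replaced the loop over the PHASES dict with closed-form integer arithmetic: out-of-band guards plus (day-1)//15+1 for the uniform 15-day bands.
import Mathlib
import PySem

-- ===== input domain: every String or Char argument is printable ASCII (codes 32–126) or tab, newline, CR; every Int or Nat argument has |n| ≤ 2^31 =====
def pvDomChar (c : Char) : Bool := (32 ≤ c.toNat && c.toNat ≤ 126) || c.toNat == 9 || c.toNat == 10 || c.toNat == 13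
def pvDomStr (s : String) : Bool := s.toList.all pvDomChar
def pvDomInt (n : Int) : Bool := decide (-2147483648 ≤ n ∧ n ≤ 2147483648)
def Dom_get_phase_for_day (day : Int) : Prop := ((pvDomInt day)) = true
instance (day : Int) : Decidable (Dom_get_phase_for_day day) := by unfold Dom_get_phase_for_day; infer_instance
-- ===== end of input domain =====

-- B replaces A's loop over the PHASES table with closed-form arithmetic on the uniform 15-day bands (simpler).

-- ===== PORT A =====
-- the "days" ranges of PHASES, in insertion order (the other dict fields are never read)
def pvPhaseDays : List (Int × (Int × Int)) :=
  [(1, (1, 15)), (2, (16, 30)), (3, (31, 45)), (4, (46, 60))]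

-- the for-loop with early return, as structural recursion over the items
def pvLoopA (day : Int) : List (Int × (Int × Int)) → Option Int
  | [] => none
  | (phase_num, (start, «end»)) :: rest =>
      if start ≤ day ∧ day ≤ «end» then some phase_num else pvLoopA day rest

def get_phase_for_day (day : Int) : Int :=
  match pvLoopA day pvPhaseDays with
  | some p => p
  | none => if day > 60 then 5 else 0

-- ===== PORT B =====
def get_phase_for_day_alt (day : Int) : Int :=
  if day < 1 then 0
  else if day > 60 then 5
  else PySem.Int.floordiv (day - 1) 15 + 1

-- ===== PRECONDITION & SPEC =====
def Spec_get_phase_for_day (day : Int) (out : Int) : Prop := out = get_phase_for_day_alt day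
instance (day : Int) (out : Int) : Decidable (Spec_get_phase_for_day day out) := by unfold Spec_get_phase_for_day; infer_instance

-- ===== CLAIM (what is proved, stated in full; the proofs are below) =====
def Claim_equal_get_phase_for_day : Prop := ∀ (day : Int), Dom_get_phase_for_day day → Spec_get_phase_for_day day (get_phase_for_day day)

-- ===== LEMMAS AND PROOFS =====
theorem pv_eq (day : Int) : get_phase_for_day day = get_phase_for_day_alt day := by
  unfold get_phase_for_day get_phase_for_day_alt pvPhaseDays
  simp only [pvLoopA, PySem.Int.floordiv, Int.fdiv_eq_ediv]
  split_ifs <;> simp only [] <;> omega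

-- ===== VERDICT (by name: the statement is the Claim_ definition above) =====
theorem get_phase_for_day_spec : Claim_equal_get_phase_for_day := by
  intro day _
  exact pv_eq day
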